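-- pv_equiv track=rewrite | github.com/foundation-models/dockerfiles | src/utility/metrics_util.py | parse_cmc_response
-- ===== SOURCE A (Python) =====
-- def extract_dict_keys(data_dict, key1, key2):
--     if key1 not in data_dict or not data_dict[key1]:
--         return ""
--     return [d.get(key2, "") for d in data_dict[key1]]
--
-- def extract_phones(data_dict, key1, key2_number, key3_tag, phone_type):
--     if key1 not in data_dict or not data_dict[key1]:
--         return ""
--     return [d[key2_number] for d in data_dict[key1] if d.get(key3_tag) == phone_type and key2_number in d]
--
-- def parse_cmc_response(fields: dict):
--
--     if fields is None:
--         return []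
--
--     entities_response = [
--         {"entity": "NAME_GIVEN", "name": extract_dict_keys(fields,"names","given")},
--         {"entity": "NAME_SURNAME", "name": extract_dict_keys(fields,"names","surname")},
--         {"entity": "NAME_PREFIX", "name": extract_dict_keys(fields,"names","prefix")},
--         {"entity": "NAME_SUFFIX", "name": extract_dict_keys(fields,"names","suffix")},
--         {"entity": "NAME_MIDDLE", "name": extract_dict_keys(fields,"names","middle")},
--         {"entity": "JOB_TITLE", "name": extract_dict_keys(fields,"jobTitles","title")},
--         {"entity": "ORGANIZATION", "name": extract_dict_keys(fields,"organizations","name")},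
--         {"entity": "EMAIL", "name": extract_dict_keys(fields,"emails","address")},
--         {"entity": "PHONE_MOBILE", "name": extract_phones(fields,"phoneNumbers","number", "phoneType", "MOBILE")},
--         {"entity": "PHONE_FAX", "name": extract_phones(fields,"phoneNumbers","number", "phoneType", "FAX")},
--         {"entity": "PHONE_OFFICE", "name": extract_phones(fields,"phoneNumbers","number", "phoneType", "OFFICE")},
--         {"entity": "ADDRESS_CITY", "name": extract_dict_keys(fields,"cities","name")},
--         {"entity": "ADDRESS_POSTAL_CODE", "name": extract_dict_keys(fields,"postalCodes","code")},
--         {"entity": "ADDRESS_STREET", "name": extract_dict_keys(fields,"addresses","line")},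
--         {"entity": "ADDRESS_COUNTRY", "name": extract_dict_keys(fields,"countries","name")},
--         {"entity": "URL", "name": extract_dict_keys(fields,"webSites","url")}
--     ]
--
--     entites_final_response = []
--     for entity in entities_response:
--         names = entity["name"]
--         if not names:
--             entites_final_response.append({"entity": entity["entity"], "name": ""})
--         elif isinstance(names, list):
--             for name in names:
--                 entites_final_response.append({"entity": entity["entity"], "name": name})
--         else:
--             entites_final_response.append({"entity": entity["entity"], "name": names})
--
--     return entites_final_response
-- ===== SOURCE B (Python) =====
-- def parse_cmc_response(fields: dict):
--     if fields is None:
--         return []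
--     # one pass over phoneNumbers, grouping numbers by phoneType
--     phones = {"MOBILE": [], "FAX": [], "OFFICE": []}
--     for d in fields.get("phoneNumbers") or []:
--         t = d.get("phoneType")
--         if t in phones and "number" in d:
--             phones[t].append(d["number"])
--     specs = [
--         ("NAME_GIVEN", "names", "given"),
--         ("NAME_SURNAME", "names", "surname"),
--         ("NAME_PREFIX", "names", "prefix"),
--         ("NAME_SUFFIX", "names", "suffix"),
--         ("NAME_MIDDLE", "names", "middle"),
--         ("JOB_TITLE", "jobTitles", "title"),
--         ("ORGANIZATION", "organizations", "name"),
--         ("EMAIL", "emails", "address"),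
--         ("PHONE_MOBILE", None, "MOBILE"),
--         ("PHONE_FAX", None, "FAX"),
--         ("PHONE_OFFICE", None, "OFFICE"),
--         ("ADDRESS_CITY", "cities", "name"),
--         ("ADDRESS_POSTAL_CODE", "postalCodes", "code"),
--         ("ADDRESS_STREET", "addresses", "line"),
--         ("ADDRESS_COUNTRY", "countries", "name"),
--         ("URL", "webSites", "url"),
--     ]
--     rows = []
--     for label, src, key in specs:
--         if src is None:
--             values = phones[key]
--         else:
--             values = [d.get(key, "") for d in fields.get(src) or []]
--         if values:
--             rows.extend({"entity": label, "name": v} for v in values)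
--         else:
--             rows.append({"entity": label, "name": ""})
--     return rows
-- ===== Notes on version B (the rewrite author's own statement) =====
-- stated objective: simpler
-- what changed: Replaces the per-entity extractor calls (three separate scans of phoneNumbers and a string-or-list 'name' sentinel unpacked by isinstance checks) with one grouping pass over phoneNumbers into a phoneType->numbers dict plus a single spec table driving one uniform loop that emits rows directly.
import Mathlib
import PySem

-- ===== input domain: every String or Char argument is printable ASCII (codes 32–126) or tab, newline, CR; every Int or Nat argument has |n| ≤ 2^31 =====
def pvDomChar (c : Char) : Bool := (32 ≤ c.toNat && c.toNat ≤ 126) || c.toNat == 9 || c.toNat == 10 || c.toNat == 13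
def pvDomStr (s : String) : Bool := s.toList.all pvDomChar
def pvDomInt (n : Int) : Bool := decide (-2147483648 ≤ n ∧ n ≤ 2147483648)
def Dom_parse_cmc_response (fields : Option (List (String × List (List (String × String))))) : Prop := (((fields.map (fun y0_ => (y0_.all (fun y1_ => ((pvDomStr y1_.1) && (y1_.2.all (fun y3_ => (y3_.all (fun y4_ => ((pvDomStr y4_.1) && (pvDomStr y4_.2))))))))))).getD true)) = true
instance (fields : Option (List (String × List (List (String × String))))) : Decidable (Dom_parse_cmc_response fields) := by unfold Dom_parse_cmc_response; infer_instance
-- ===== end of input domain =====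

-- B replaces A's three separate phoneNumbers scans and string-or-list sentinel with one
-- grouping pass into a phoneType->numbers dict and a single spec table driving one uniform
-- row-emitting loop (objective: simpler).

-- ===== PORT A =====
-- extract_dict_keys: Python returns "" (falsy) when key missing or list empty; modelled as none
def pvExtractDictKeys (fields : List (String × List (List (String × String)))) (key1 key2 : String) :
    Option (List String) :=
  match (PySem.Dict.mk fields).get? key1 with
  | none => none
  | some l => if l = [] then none
      else some (l.map (fun d => (PySem.Dict.mk d).getD key2 ""))

-- extract_phones: "" modelled as none; d[key2_number] is safe under the 'key2_number in d' guard
def pvExtractPhones (fields : List (String × List (List (String × String)))) (key1 key2n key3t pt : String) :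
    Option (List String) :=
  match (PySem.Dict.mk fields).get? key1 with
  | none => none
  | some l => if l = [] then none
      else some ((l.filter (fun d => (PySem.Dict.mk d).get? key3t == some pt && (PySem.Dict.mk d).contains key2n)).map
        (fun d => (PySem.Dict.mk d).getD key2n ""))

def parse_cmc_response (fields : Option (List (String × List (List (String × String))))) : List (List (String × String)) :=
  match fields with
  | none => []
  | some f =>
    let entities : List (String × Option (List String)) := [
      ("NAME_GIVEN", pvExtractDictKeys f "names" "given"),
      ("NAME_SURNAME", pvExtractDictKeys f "names" "surname"),
      ("NAME_PREFIX", pvExtractDictKeys f "names" "prefix"),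
      ("NAME_SUFFIX", pvExtractDictKeys f "names" "suffix"),
      ("NAME_MIDDLE", pvExtractDictKeys f "names" "middle"),
      ("JOB_TITLE", pvExtractDictKeys f "jobTitles" "title"),
      ("ORGANIZATION", pvExtractDictKeys f "organizations" "name"),
      ("EMAIL", pvExtractDictKeys f "emails" "address"),
      ("PHONE_MOBILE", pvExtractPhones f "phoneNumbers" "number" "phoneType" "MOBILE"),
      ("PHONE_FAX", pvExtractPhones f "phoneNumbers" "number" "phoneType" "FAX"),
      ("PHONE_OFFICE", pvExtractPhones f "phoneNumbers" "number" "phoneType" "OFFICE"),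
      ("ADDRESS_CITY", pvExtractDictKeys f "cities" "name"),
      ("ADDRESS_POSTAL_CODE", pvExtractDictKeys f "postalCodes" "code"),
      ("ADDRESS_STREET", pvExtractDictKeys f "addresses" "line"),
      ("ADDRESS_COUNTRY", pvExtractDictKeys f "countries" "name"),
      ("URL", pvExtractDictKeys f "webSites" "url")]
    entities.foldl (fun acc e =>
      match e.2 with
      | none => acc ++ [[("entity", e.1), ("name", "")]]        -- not names ("" case)
      | some names =>
        if names = [] then acc ++ [[("entity", e.1), ("name", "")]]   -- not names (empty list)
        else acc ++ names.map (fun n => [("entity", e.1), ("name", n)])) []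

-- ===== PORT B =====
-- one grouping pass over phoneNumbers: phones = {"MOBILE": [], "FAX": [], "OFFICE": []}; append matching numbers
def pvPhoneGroups (l : List (List (String × String))) : PySem.Dict String (List String) :=
  l.foldl (fun acc d =>
    match (PySem.Dict.mk d).get? "phoneType" with
    | none => acc                                   -- t = None: 'None in phones' is False
    | some t =>
      if acc.contains t && (PySem.Dict.mk d).contains "number" then
        acc.modify t [] (· ++ [(PySem.Dict.mk d).getD "number" ""])
      else acc)
    (PySem.Dict.ofList [("MOBILE", []), ("FAX", []), ("OFFICE", [])])

-- one spec's value list: (label, some src, key) plain field, (label, none, phoneType) phones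
def pvSpecValues (f : List (String × List (List (String × String))))
    (phones : PySem.Dict String (List String)) (spec : String × Option String × String) : List String :=
  match spec.2.1 with
  | none => phones.getD spec.2.2 []
  | some src => (((PySem.Dict.mk f).get? src).getD []).map (fun d => (PySem.Dict.mk d).getD spec.2.2 "")

def parse_cmc_response_alt (fields : Option (List (String × List (List (String × String))))) : List (List (String × String)) :=
  match fields with
  | none => []
  | some f =>
    let phones := pvPhoneGroups (((PySem.Dict.mk f).get? "phoneNumbers").getD [])
    let specs : List (String × Option String × String) := [
      ("NAME_GIVEN", some "names", "given"),
      ("NAME_SURNAME", some "names", "surname"),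
      ("NAME_PREFIX", some "names", "prefix"),
      ("NAME_SUFFIX", some "names", "suffix"),
      ("NAME_MIDDLE", some "names", "middle"),
      ("JOB_TITLE", some "jobTitles", "title"),
      ("ORGANIZATION", some "organizations", "name"),
      ("EMAIL", some "emails", "address"),
      ("PHONE_MOBILE", none, "MOBILE"),
      ("PHONE_FAX", none, "FAX"),
      ("PHONE_OFFICE", none, "OFFICE"),
      ("ADDRESS_CITY", some "cities", "name"),
      ("ADDRESS_POSTAL_CODE", some "postalCodes", "code"),
      ("ADDRESS_STREET", some "addresses", "line"),
      ("ADDRESS_COUNTRY", some "countries", "name"),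
      ("URL", some "webSites", "url")]
    specs.foldl (fun acc s =>
      let vs := pvSpecValues f phones s
      if vs = [] then acc ++ [[("entity", s.1), ("name", "")]]
      else acc ++ vs.map (fun n => [("entity", s.1), ("name", n)])) []

-- ===== PRECONDITION & SPEC =====
def Spec_parse_cmc_response (fields : Option (List (String × List (List (String × String))))) (out : List (List (String × String))) : Prop := out = parse_cmc_response_alt fields
instance (fields : Option (List (String × List (List (String × String))))) (out : List (List (String × String))) : Decidable (Spec_parse_cmc_response fields out) := by unfold Spec_parse_cmc_response; infer_instance

-- ===== CLAIM (what is proved, stated in full; the proofs are below) =====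
def Claim_equal_parse_cmc_response : Prop := ∀ (fields : Option (List (String × List (List (String × String))))), Dom_parse_cmc_response fields → Spec_parse_cmc_response fields (parse_cmc_response fields)

-- ===== LEMMAS AND PROOFS =====

-- A-side row emission for one entity
def pvRowA (label : String) (v : Option (List String)) : List (List (String × String)) :=
  match v with
  | none => [[("entity", label), ("name", "")]]
  | some names =>
    if names = [] then [[("entity", label), ("name", "")]]
    else names.map (fun n => [("entity", label), ("name", n)])

-- B-side row emission for one spec
def pvRowB (f : List (String × List (List (String × String))))
    (phones : PySem.Dict String (List String)) (s : String × Option String × String) :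
    List (List (String × String)) :=
  let vs := pvSpecValues f phones s
  if vs = [] then [[("entity", s.1), ("name", "")]]
  else vs.map (fun n => [("entity", s.1), ("name", n)])

theorem plain_seg (f : List (String × List (List (String × String)))) (label src key : String) :
    pvRowA label (pvExtractDictKeys f src key) =
    pvRowB f phones (label, some src, key) := by
  unfold pvRowA pvRowB pvSpecValues pvExtractDictKeys
  cases h : (PySem.Dict.mk f).get? src with
  | none => simp [h]
  | some l =>
    by_cases hl : l = [] <;> simp [h, hl]

theorem groups_getD (l : List (List (String × String))) (acc : PySem.Dict String (List String))
    (pt : String) (hc : acc.contains pt = true) :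
    (l.foldl (fun acc d =>
      match (PySem.Dict.mk d).get? "phoneType" with
      | none => acc
      | some t =>
        if acc.contains t && (PySem.Dict.mk d).contains "number" then
          acc.modify t [] (· ++ [(PySem.Dict.mk d).getD "number" ""])
        else acc) acc).getD pt []
    = acc.getD pt [] ++
      ((l.filter (fun d => (PySem.Dict.mk d).get? "phoneType" == some pt && (PySem.Dict.mk d).contains "number")).map
        (fun d => (PySem.Dict.mk d).getD "number" "")) := by
  induction l generalizing acc with
  | nil => simp
  | cons d rest ih =>
    simp only [List.foldl_cons]
    cases hpt : (PySem.Dict.mk d).get? "phoneType" with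
    | none =>
      simp only [hpt]
      rw [List.filter_cons_of_neg (by simp [hpt]), ih acc hc]
    | some t =>
      simp only [hpt]
      by_cases ht : t = pt
      · subst ht
        cases hn : (PySem.Dict.mk d).contains "number" with
        | false =>
          simp only [hn, Bool.and_false, Bool.false_eq_true, if_false]
          rw [List.filter_cons_of_neg (by simp [hn]), ih acc hc]
        | true =>
          simp only [hc, hn, Bool.and_self, if_true]
          rw [List.filter_cons_of_pos (by simp [hpt, hn]),
            ih _ (by simp [PySem.Dict.contains_modify, hc]),
            PySem.Dict.getD_modify_self]
          simp
      · rw [List.filter_cons_of_neg (by simp [hpt, ht])]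
        cases hct : acc.contains t with
        | false =>
          simp only [hct, Bool.false_and, Bool.false_eq_true, if_false]
          exact ih acc hc
        | true =>
          cases hn : (PySem.Dict.mk d).contains "number" with
          | false =>
            simp only [hct, hn, Bool.and_false, Bool.false_eq_true, if_false]
            exact ih acc hc
          | true =>
            simp only [hct, hn, Bool.and_self, if_true]
            rw [ih _ (by simp [PySem.Dict.contains_modify, hc]),
              PySem.Dict.getD_modify_of_ne acc [] _ (fun h => ht h.symm)]

theorem phone_seg (f : List (String × List (List (String × String)))) (label pt : String)
    (hpt : pt = "MOBILE" ∨ pt = "FAX" ∨ pt = "OFFICE") :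
    pvRowA label (pvExtractPhones f "phoneNumbers" "number" "phoneType" pt) =
    pvRowB f (pvPhoneGroups (((PySem.Dict.mk f).get? "phoneNumbers").getD [])) (label, none, pt) := by
  have hc : (PySem.Dict.ofList [("MOBILE", ([] : List String)), ("FAX", []), ("OFFICE", [])]).contains pt = true := by
    rcases hpt with h | h | h <;> subst h <;> decide
  have hinit : (PySem.Dict.ofList [("MOBILE", ([] : List String)), ("FAX", []), ("OFFICE", [])]).getD pt [] = [] := by
    rcases hpt with h | h | h <;> subst h <;> decide
  unfold pvRowA pvRowB pvSpecValues pvExtractPhones pvPhoneGroups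
  cases h : (PySem.Dict.mk f).get? "phoneNumbers" with
  | none =>
    simp only [h, Option.getD_none]
    rw [groups_getD [] _ pt hc, hinit]
    simp
  | some l =>
    by_cases hl : l = []
    · subst hl
      simp only [h, Option.getD_some]
      rw [groups_getD [] _ pt hc, hinit]
      simp
    · simp only [h, Option.getD_some, if_neg hl]
      rw [groups_getD l _ pt hc, hinit, List.nil_append]

theorem parse_cmc_response_main (fields : Option (List (String × List (List (String × String))))) :
    parse_cmc_response fields = parse_cmc_response_alt fields := by
  cases fields with
  | none => rfl
  | some f =>
    show List.foldl _ [] _ = List.foldl _ [] _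
    have hA : ∀ (es : List (String × Option (List String))),
        es.foldl (fun acc (e : String × Option (List String)) =>
          match e.2 with
          | none => acc ++ [[("entity", e.1), ("name", "")]]
          | some names =>
            if names = [] then acc ++ [[("entity", e.1), ("name", "")]]
            else acc ++ names.map (fun n => [("entity", e.1), ("name", n)])) []
        = es.flatMap (fun e => pvRowA e.1 e.2) := by
      intro es
      have hfun : (fun acc (e : String × Option (List String)) =>
          match e.2 with
          | none => acc ++ [[("entity", e.1), ("name", "")]]
          | some names =>
            if names = [] then acc ++ [[("entity", e.1), ("name", "")]]
            else acc ++ names.map (fun n => [("entity", e.1), ("name", n)]))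
          = (fun acc e => acc ++ pvRowA e.1 e.2) := by
        funext acc e
        cases e with
        | mk lab v => cases v with
          | none => rfl
          | some names =>
            simp only [pvRowA]
            split <;> rfl
      rw [hfun, PySem.List.foldl_append_eq_flatMap, List.nil_append]
    have hB : ∀ (ss : List (String × Option String × String)) (ph),
        ss.foldl (fun acc (s : String × Option String × String) =>
          let vs := pvSpecValues f ph s
          if vs = [] then acc ++ [[("entity", s.1), ("name", "")]]
          else acc ++ vs.map (fun n => [("entity", s.1), ("name", n)])) []
        = ss.flatMap (fun s => pvRowB f ph s) := by
      intro ss ph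
      have hfun : (fun acc (s : String × Option String × String) =>
          let vs := pvSpecValues f ph s
          if vs = [] then acc ++ [[("entity", s.1), ("name", "")]]
          else acc ++ vs.map (fun n => [("entity", s.1), ("name", n)]))
          = (fun acc s => acc ++ pvRowB f ph s) := by
        funext acc s
        simp only [pvRowB]
        split <;> rfl
      rw [hfun, PySem.List.foldl_append_eq_flatMap, List.nil_append]
    rw [hA, hB]
    simp only [List.flatMap_cons, List.flatMap_nil, List.append_nil]
    rw [plain_seg, plain_seg, plain_seg, plain_seg, plain_seg, plain_seg, plain_seg, plain_seg,
      phone_seg f "PHONE_MOBILE" "MOBILE" (Or.inl rfl),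
      phone_seg f "PHONE_FAX" "FAX" (Or.inr (Or.inl rfl)),
      phone_seg f "PHONE_OFFICE" "OFFICE" (Or.inr (Or.inr rfl)),
      plain_seg, plain_seg, plain_seg, plain_seg, plain_seg]

-- ===== VERDICT (by name: the statement is the Claim_ definition above) =====
theorem parse_cmc_response_spec : Claim_equal_parse_cmc_response := by
  intro fields _
  unfold Spec_parse_cmc_response
  exact parse_cmc_response_main fields
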